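-- pv_equiv track=rewrite | github.com/Tokyo113/leetcode_python | Graph/code_05.py | taowa
-- ===== SOURCE A (Python) =====
-- def taowa(arr,k,n):
--     if arr is None or arr == []:
--         return 0
--     dp = [0]+arr
--     for i in range(1,k+1):
--         for j in range(1,n+1):
--             dp[j] = dp[j]+dp[j-1]
--     return dp[n]
-- ===== SOURCE B (Python) =====
-- def taowa(arr, k, n):
--     # closed form: after k prefix-sum passes, dp[n] = sum arr[j-1]*C(n-j+k-1, k-1)
--     if not arr or n <= 0:
--         return 0
--     if k <= 0:
--         return arr[n - 1]
--     c = 1  # C(k-1, k-1), the coefficient of arr[n-1]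
--     total = 0
--     for j in range(n, 0, -1):
--         total += arr[j - 1] * c
--         c = c * (n - j + k) // (n - j + 1)
--     return total
-- ===== Notes on version B (the rewrite author's own statement) =====
-- stated objective: faster
-- what changed: Replaces the k rounds of in-place prefix summation over dp (O(k*n) additions) by the closed form dp[n] = sum_j arr[j-1]*C(n-j+k-1,k-1), computed in one O(n) pass with incrementally updated binomial coefficients.
-- intended difference: For negative in-range n (arr nonempty, -len(arr) <= n < 0, and the wrapped element arr[n] nonzero) A's final dp[n] wraps around and returns arr[n], an accident of Python negative indexing; B returns 0, the natural value of dp at a nonexistent position, which is what the dp recurrence intends. — e.g. on taowa([5], 2, -1): A returns 5, B returns 0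
import Mathlib
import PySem

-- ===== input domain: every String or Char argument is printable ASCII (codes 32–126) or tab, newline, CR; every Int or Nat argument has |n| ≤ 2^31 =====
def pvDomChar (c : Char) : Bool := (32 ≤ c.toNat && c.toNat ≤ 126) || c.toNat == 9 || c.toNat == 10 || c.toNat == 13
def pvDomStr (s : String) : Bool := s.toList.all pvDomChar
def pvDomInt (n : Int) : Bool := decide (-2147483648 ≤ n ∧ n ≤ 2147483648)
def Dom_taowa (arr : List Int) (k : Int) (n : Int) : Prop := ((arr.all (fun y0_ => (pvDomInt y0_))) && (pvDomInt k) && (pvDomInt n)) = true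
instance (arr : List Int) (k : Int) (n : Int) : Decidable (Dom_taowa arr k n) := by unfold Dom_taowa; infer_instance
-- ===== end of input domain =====

-- B replaces A's k rounds of in-place prefix summation by a single O(n) pass computing the
-- closed form dp[n] = Σ_j arr[j-1]·C(n-j+k-1,k-1) with incrementally updated binomial coefficients.


-- ===== PORT A =====
def taowa (arr : List Int) (k : Int) (n : Int) : Int :=
  if arr = [] then 0
  else
    PySem.List.pyGetD
      ((PySem.List.pyRange 1 (k+1) 1).foldl (fun dp _i =>
        (PySem.List.pyRange 1 (n+1) 1).foldl
          (fun dp j => PySem.List.pySetD dp j (PySem.List.pyGetD dp j 0 + PySem.List.pyGetD dp (j-1) 0))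
          dp)
        ((0 : Int) :: arr))
      n 0

-- ===== PORT B =====
def taowa_alt (arr : List Int) (k : Int) (n : Int) : Int :=
  if arr = [] ∨ n ≤ 0 then 0
  else if k ≤ 0 then PySem.List.pyGetD arr (n-1) 0
  else
    ((PySem.List.pyRange n 0 (-1)).foldl
      (fun (s : Int × Int) j =>
        (PySem.Int.floordiv (s.1 * (n - j + k)) (n - j + 1),
         s.2 + PySem.List.pyGetD arr (j-1) 0 * s.1))
      (1, 0)).2

-- ===== PRECONDITION & SPEC =====
-- Pre_ excludes exactly the inputs where A raises IndexError: arr nonempty with n > len(arr)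
-- (the loops / final dp[n] index past the end) or n < -(len(arr)+1) (dp[n] below range).
def Pre_taowa (arr : List Int) (k : Int) (n : Int) : Prop :=
  arr = [] ∨ (-(arr.length : Int) - 1 ≤ n ∧ n ≤ (arr.length : Int))
instance (arr : List Int) (k : Int) (n : Int) : Decidable (Pre_taowa arr k n) := by unfold Pre_taowa; infer_instance
def pvWitness_taowa : List Int × Int × Int := ([1, 2], 2, 2)

-- For negative in-range n (arr nonempty, -len(arr) ≤ n < 0, wrapped element arr[n] ≠ 0) A's final
-- dp[n] wraps around and returns arr[n], an accident of Python negative indexing; B returns 0, the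
-- natural value of dp at a nonexistent position, which is what the dp recurrence intends.
def D_taowa (arr : List Int) (k : Int) (n : Int) : Prop :=
  arr ≠ [] ∧ -(arr.length : Int) ≤ n ∧ n < 0 ∧ PySem.List.pyGetD arr n 0 ≠ 0
instance (arr : List Int) (k : Int) (n : Int) : Decidable (D_taowa arr k n) := by unfold D_taowa; infer_instance

def Spec_taowa (arr : List Int) (k : Int) (n : Int) (out : Int) : Prop := ¬ D_taowa arr k n → out = taowa_alt arr k n
instance (arr : List Int) (k : Int) (n : Int) (out : Int) : Decidable (Spec_taowa arr k n out) := by unfold Spec_taowa; infer_instance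

def pvDiffWitness_taowa : List Int × Int × Int := ([5], 2, -1)
def pvDiffWitnessOut_taowa : Int × Int := (5, 0)

-- ===== CLAIM (what is proved, stated in full; the proofs are below) =====
def Claim_unchanged_taowa : Prop := ∀ (arr : List Int) (k : Int) (n : Int), Dom_taowa arr k n → Pre_taowa arr k n → Spec_taowa arr k n (taowa arr k n)
def Claim_changed_taowa : Prop := Dom_taowa (pvDiffWitness_taowa.1) (pvDiffWitness_taowa.2.1) (pvDiffWitness_taowa.2.2) ∧ Pre_taowa (pvDiffWitness_taowa.1) (pvDiffWitness_taowa.2.1) (pvDiffWitness_taowa.2.2) ∧ D_taowa (pvDiffWitness_taowa.1) (pvDiffWitness_taowa.2.1) (pvDiffWitness_taowa.2.2) ∧ taowa (pvDiffWitness_taowa.1) (pvDiffWitness_taowa.2.1) (pvDiffWitness_taowa.2.2) = pvDiffWitnessOut_taowa.1 ∧ taowa_alt (pvDiffWitness_taowa.1) (pvDiffWitness_taowa.2.1) (pvDiffWitness_taowa.2.2) = pvDiffWitnessOut_taowa.2 ∧ pvDiffWitnessOut_taowa.1 ≠ pvDiffWitnessOut_taowa.2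
def Claim_exact_taowa : Prop := ∀ (arr : List Int) (k : Int) (n : Int), Dom_taowa arr k n → Pre_taowa arr k n → D_taowa arr k n → taowa arr k n ≠ taowa_alt arr k n

-- ===== LEMMAS AND PROOFS =====

-- dp as a function Nat → Int
def dget (dp : List Int) : Nat → Int := fun t => dp.getD t 0

-- one in-place prefix-sum pass, as the recurrence dp'[j] = dp'[j-1] + dp[j]
def pf (d : Nat → Int) : Nat → Int
  | 0 => d 0
  | j+1 => pf d j + d (j+1)

-- the dp function after i passes
def model (d : Nat → Int) : Nat → Nat → Int
  | 0 => d
  | i+1 => pf (model d i)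

lemma model_zero (d : Nat → Int) (h : d 0 = 0) : ∀ i, model d i 0 = 0
  | 0 => h
  | i+1 => model_zero d h i

-- A's inner loop, as a Nat recursion
def innerN (dp : List Int) : Nat → List Int
  | 0 => dp
  | p+1 => (innerN dp p).set (p+1) ((innerN dp p).getD (p+1) 0 + (innerN dp p).getD p 0)

lemma innerEq (N : Nat) (dp : List Int) :
    (PySem.List.pyRange 1 ((N : Int)+1) 1).foldl
      (fun dp j => PySem.List.pySetD dp j (PySem.List.pyGetD dp j 0 + PySem.List.pyGetD dp (j-1) 0))
      dp = innerN dp N := by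
  induction N with
  | zero =>
    rw [show ((0:Nat):Int)+1 = 1 by norm_num, PySem.List.pyRange_one_eq_nil (le_refl 1)]
    rfl
  | succ N ih =>
    rw [show (((N+1 : Nat)):Int) + 1 = ((N:Int)+1) + 1 by push_cast; ring,
        PySem.List.pyRange_one_succ_right (by omega), List.foldl_append, ih]
    simp only [List.foldl_cons, List.foldl_nil]
    rw [show ((N:Int)+1-1) = ((N:Nat):Int) by ring, show ((N:Int)+1) = ((N+1:Nat):Int) by push_cast; ring]
    rw [PySem.List.pySetD_natCast, PySem.List.pyGetD_natCast, PySem.List.pyGetD_natCast]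
    rfl

lemma pf_congr (d e : Nat → Int) (j : Nat) (h : ∀ t, t ≤ j → d t = e t) : pf d j = pf e j := by
  induction j with
  | zero => exact h 0 (le_refl 0)
  | succ j ih => simp only [pf]; rw [ih (fun t ht => h t (Nat.le_succ_of_le ht)), h (j+1) (le_refl _)]

lemma innerN_length (dp : List Int) (N : Nat) : (innerN dp N).length = dp.length := by
  induction N with
  | zero => rfl
  | succ p ih => simp [innerN, ih]

lemma getD_set' (l : List Int) (i j : Nat) (v : Int) :
    (l.set i v).getD j 0 = if i = j ∧ i < l.length then v else l.getD j 0 := by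
  simp only [List.getD_eq_getElem?_getD, List.getElem?_set]
  split_ifs with h1 h2 h3 h4 <;> simp_all
  omega

lemma innerN_getD (dp : List Int) (N : Nat) : N < dp.length → ∀ (j : Nat),
    (innerN dp N).getD j 0 = if j ≤ N then pf (dget dp) j else dp.getD j 0 := by
  induction N with
  | zero =>
    intro _ j
    by_cases hj : j ≤ 0
    · interval_cases j
      simp [innerN, pf, dget]
    · simp [innerN, hj]
  | succ N ih =>
    intro hN j
    have hN' : N < dp.length := by omega
    have hlen : (innerN dp N).length = dp.length := innerN_length dp N
    simp only [innerN, getD_set']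
    by_cases hj : j = N + 1
    · subst hj
      rw [if_pos ⟨rfl, by omega⟩, ih hN' (N+1), ih hN' N,
          if_neg (by omega : ¬ N + 1 ≤ N), if_pos (le_refl N), if_pos (by omega : N + 1 ≤ N + 1)]
      show dp.getD (N+1) 0 + pf (dget dp) N = pf (dget dp) (N+1)
      simp only [pf, dget]
      ring
    · rw [if_neg (by simp only [not_and]; omega), ih hN' j]
      by_cases h2 : j ≤ N
      · rw [if_pos h2, if_pos (by omega)]
      · rw [if_neg h2, if_neg (by omega)]

lemma foldl_const_iterate {α : Type} (g : List Int → List Int) (l : List α) (dp : List Int) :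
    l.foldl (fun d _ => g d) dp = g^[l.length] dp := by
  induction l generalizing dp with
  | nil => rfl
  | cons x t ih => simp [List.foldl_cons, ih, Function.iterate_succ_apply]

lemma iter_length (N : Nat) (i : Nat) (dp : List Int) :
    ((fun d => innerN d N)^[i] dp).length = dp.length := by
  induction i with
  | zero => rfl
  | succ i ih => rw [Function.iterate_succ_apply']; simp [innerN_length, ih]

lemma outer_getD (arr : List Int) (N : Nat) (hN : N ≤ arr.length) (i : Nat) :
    ∀ j, j ≤ N →
    ((fun d => innerN d N)^[i] ((0:Int) :: arr)).getD j 0 = model (dget ((0:Int) :: arr)) i j := by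
  induction i with
  | zero => intro j _; rfl
  | succ i ih =>
    intro j hj
    rw [Function.iterate_succ_apply']
    have hlen : ((fun d => innerN d N)^[i] ((0:Int) :: arr)).length = arr.length + 1 := by
      simpa using iter_length N i ((0:Int) :: arr)
    show (innerN ((fun d => innerN d N)^[i] ((0:Int) :: arr)) N).getD j 0 = _
    rw [innerN_getD _ N (by omega) j, if_pos hj]
    exact pf_congr _ _ j (fun t ht => ih t (le_trans ht hj))

lemma model_closed (arr : List Int) (i : Nat) : ∀ j : Nat,
    model (dget ((0:Int) :: arr)) (i+1) j
      = ∑ s ∈ Finset.range j, arr.getD s 0 * ((Nat.choose (j - 1 - s + i) i : Nat) : Int) := by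
  induction i with
  | zero =>
    intro j
    induction j with
    | zero => simp [model, pf, dget]
    | succ j ihj =>
      have e : model (dget ((0:Int) :: arr)) 1 (j+1)
          = model (dget ((0:Int) :: arr)) 1 j + dget ((0:Int) :: arr) (j+1) := rfl
      rw [e, ihj, Finset.sum_range_succ]
      simp [dget]
  | succ i ihi =>
    intro j
    induction j with
    | zero =>
      simp only [Finset.range_zero, Finset.sum_empty]
      exact model_zero (dget ((0:Int) :: arr)) rfl (i+1+1)
    | succ j ihj =>
      have e : model (dget ((0:Int) :: arr)) (i+2) (j+1)
          = model (dget ((0:Int) :: arr)) (i+2) j + model (dget ((0:Int) :: arr)) (i+1) (j+1) := rfl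
      rw [e, ihj, ihi (j+1), Finset.sum_range_succ, Finset.sum_range_succ
            (f := fun s => arr.getD s 0 * ((Nat.choose (j + 1 - 1 - s + (i+1)) (i+1) : Nat) : Int))]
      have hterm : ∀ s ∈ Finset.range j,
          arr.getD s 0 * ((Nat.choose (j - 1 - s + (i+1)) (i+1) : Nat) : Int)
            + arr.getD s 0 * ((Nat.choose (j + 1 - 1 - s + i) i : Nat) : Int)
          = arr.getD s 0 * ((Nat.choose (j + 1 - 1 - s + (i+1)) (i+1) : Nat) : Int) := by
        intro s hs
        have hs' : s < j := Finset.mem_range.mp hs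
        have e1 : j - 1 - s + (i+1) = (j - s + i) := by omega
        have e2 : j + 1 - 1 - s + i = j - s + i := by omega
        have e3 : j + 1 - 1 - s + (i+1) = (j - s + i) + 1 := by omega
        rw [e1, e2, e3, ← mul_add, Nat.choose_succ_succ (j - s + i) i]
        push_cast
        ring
      have hsum : (∑ s ∈ Finset.range j, arr.getD s 0 * ((Nat.choose (j - 1 - s + (i+1)) (i+1) : Nat) : Int))
            + (∑ s ∈ Finset.range j, arr.getD s 0 * ((Nat.choose (j + 1 - 1 - s + i) i : Nat) : Int))
          = ∑ s ∈ Finset.range j, arr.getD s 0 * ((Nat.choose (j + 1 - 1 - s + (i+1)) (i+1) : Nat) : Int) := by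
        rw [← Finset.sum_add_distrib]
        exact Finset.sum_congr rfl hterm
      have t2 : (Nat.choose (j + 1 - 1 - j + i) i : Int) = 1 := by
        rw [show j + 1 - 1 - j + i = i from by omega, Nat.choose_self, Nat.cast_one]
      have t3 : (Nat.choose (j + 1 - 1 - j + (i+1)) (i+1) : Int) = 1 := by
        rw [show j + 1 - 1 - j + (i+1) = i+1 from by omega, Nat.choose_self, Nat.cast_one]
      rw [t2, t3, ← hsum]
      ring

lemma choose_slide (M r : Nat) : (M + r).choose r * (M + r + 1) = (M + r + 1).choose r * (M + 1) := by
  have h1 := Nat.succ_mul_choose_eq (M + r) M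
  have h2 : (M + r).choose M = (M + r).choose r := by
    have := Nat.choose_symm (n := M + r) (k := r) (Nat.le_add_left r M)
    simpa using this
  have h3 : (M + r + 1).choose (M + 1) = (M + r + 1).choose r := by
    have := Nat.choose_symm (n := M + r + 1) (k := r) (by omega)
    have e : M + r + 1 - r = M + 1 := by omega
    rw [e] at this; exact this
  calc (M + r).choose r * (M + r + 1) = (M + r).succ * (M + r).choose M := by
        rw [h2]; simp [Nat.succ_eq_add_one]; ring
    _ = (M + r).succ.choose M.succ * M.succ := h1
    _ = (M + r + 1).choose r * (M + 1) := by rw [← h3]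

lemma bloop (arr : List Int) (N r : Nat) : ∀ (m : Nat), m ≤ N → ∀ (c t : Int),
    c = ((N - m + r).choose r : Nat) →
    ((List.range' (N - m) m).foldl
      (fun (s : Int × Int) (q : Nat) =>
        (PySem.Int.floordiv (s.1 * ((N:Int) - ((N:Int) - (q:Int)) + ((r:Int) + 1)))
           ((N:Int) - ((N:Int) - (q:Int)) + 1),
         s.2 + PySem.List.pyGetD arr (((N:Int) - (q:Int)) - 1) 0 * s.1))
      (c, t)).2
    = t + ∑ s ∈ Finset.range m, arr.getD s 0 * ((Nat.choose (N - 1 - s + r) r : Nat) : Int) := by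
  intro m
  induction m with
  | zero => intro _ c t _; simp
  | succ m ih =>
    intro hm c t hc
    rw [List.range'_succ, show N - (m+1) + 1 = N - m from by omega, List.foldl_cons]
    have e0 : ((N - (m+1) : Nat) : Int) = (N:Int) - (m:Int) - 1 := by omega
    rw [e0]
    have e1 : (N:Int) - ((N:Int) - ((N:Int) - (m:Int) - 1)) + ((r:Int) + 1) = ((N:Int) - (m:Int) - 1) + (r:Int) + 1 := by ring
    have e2 : (N:Int) - ((N:Int) - ((N:Int) - (m:Int) - 1)) + 1 = ((N:Int) - (m:Int) - 1) + 1 := by ring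
    have e3 : ((N:Int) - ((N:Int) - (m:Int) - 1)) - 1 = (m:Int) := by ring
    simp only [e1, e2, e3]
    have hMcast : ((N - (m+1) : Nat) : Int) = (N:Int) - (m:Int) - 1 := e0
    have hc' : PySem.Int.floordiv (c * ((N:Int) - (m:Int) - 1 + (r:Int) + 1)) ((N:Int) - (m:Int) - 1 + 1)
        = ((Nat.choose (N - m + r) r : Nat) : Int) := by
      set M : Nat := N - (m+1) with hMdef
      have hM1 : (N:Int) - (m:Int) - 1 = (M:Int) := by omega
      have hnum : c * ((N:Int) - (m:Int) - 1 + (r:Int) + 1) = ((Nat.choose (M + r + 1) r * (M + 1) : Nat) : Int) := by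
        rw [hc, hM1, show N - (m+1) + r = M + r from rfl, ← choose_slide M r]
        push_cast
        ring
      rw [hnum, hM1, PySem.Int.floordiv_eq_ediv_of_pos (by omega : (0:Int) < (M:Int) + 1)]
      have : ((Nat.choose (M + r + 1) r * (M + 1) : Nat) : Int) = ((Nat.choose (M + r + 1) r : Nat) : Int) * ((M:Int) + 1) := by push_cast; ring
      rw [this, Int.mul_ediv_cancel _ (by omega : (M:Int) + 1 ≠ 0)]
      have hMe : M + r + 1 = N - m + r := by omega
      rw [hMe]
    rw [hc', PySem.List.pyGetD_natCast, ih (by omega) _ _ rfl, Finset.sum_range_succ, hc,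
        show N - (m+1) + r = N - 1 - m + r from by omega]
    ring

lemma A_nopass (arr : List Int) (k n : Int) (harr : arr ≠ []) (hn : n ≤ 0) :
    taowa arr k n = PySem.List.pyGetD ((0:Int) :: arr) n 0 := by
  unfold taowa
  rw [if_neg harr, PySem.List.pyRange_one_eq_nil (show n + 1 ≤ 1 by omega)]
  simp only [List.foldl_nil, PySem.List.foldl_ignore]

lemma A_nok (arr : List Int) (k n : Int) (harr : arr ≠ []) (hk : k ≤ 0) :
    taowa arr k n = PySem.List.pyGetD ((0:Int) :: arr) n 0 := by
  unfold taowa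
  rw [if_neg harr, PySem.List.pyRange_one_eq_nil (show k + 1 ≤ 1 by omega)]
  rfl

lemma pyGetD_cons_neg (x : Int) (arr : List Int) (n : Int)
    (h1 : -(arr.length:Int) ≤ n) (h2 : n < 0) :
    PySem.List.pyGetD (x :: arr) n 0 = PySem.List.pyGetD arr n 0 := by
  set K := (-n).toNat with hK
  have h0 : 0 < K := by omega
  have hle : K ≤ arr.length := by omega
  rw [show n = -((K:Nat):Int) from by omega,
      PySem.List.pyGetD_neg_natCast _ K _ h0 (by simp; omega),
      PySem.List.pyGetD_neg_natCast _ K _ h0 hle]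
  have e : (x :: arr).length - K = (arr.length - K) + 1 := by simp; omega
  simp only [e, List.getElem_cons_succ]

lemma getD_shift (arr : List Int) (n : Int) (h : 1 ≤ n) :
    PySem.List.pyGetD ((0:Int) :: arr) n 0 = PySem.List.pyGetD arr (n-1) 0 := by
  set m := n.toNat - 1 with hm
  rw [show n = ((m+1 : Nat) : Int) from by omega,
      show ((m+1:Nat):Int) - 1 = ((m:Nat):Int) from by push_cast; ring,
      PySem.List.pyGetD_natCast, PySem.List.pyGetD_natCast]
  simp [List.getD]

lemma main_pos (arr : List Int) (k n : Int) (harr : arr ≠ [])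
    (hn : 1 ≤ n) (hnlen : n ≤ (arr.length:Int)) (hk : 1 ≤ k) :
    taowa arr k n = taowa_alt arr k n := by
  set N := n.toNat with hNdef
  set r := (k-1).toNat with hrdef
  have hnN : n = (N:Int) := by omega
  have hkr : k = (r:Int) + 1 := by omega
  have hNlen : N ≤ arr.length := by omega
  have hN1 : 1 ≤ N := by omega
  unfold taowa taowa_alt
  rw [if_neg harr, if_neg (show ¬ (arr = [] ∨ n ≤ 0) by push Not; exact ⟨harr, by omega⟩),
      if_neg (show ¬ k ≤ 0 by omega)]
  rw [hnN, hkr]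
  -- A side: inner loops are innerN, outer loop is iteration
  rw [PySem.List.foldl_congr_mem _ _ (fun d _ => innerN d N) _
        (fun acc x _ => innerEq N acc),
      foldl_const_iterate, PySem.List.length_pyRange_one,
      show (((r:Int) + 1 + 1) - 1).toNat = r + 1 from by omega,
      PySem.List.pyGetD_natCast,
      outer_getD arr N hNlen (r+1) N (le_refl N), model_closed arr r N]
  -- B side
  rw [PySem.List.pyRange_neg_one, show (((N:Int)) - 0).toNat = N from by omega,
      List.foldl_map, List.range_eq_range',
      show List.range' 0 N = List.range' (N - N) N from by rw [Nat.sub_self],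
      bloop arr N r N (le_refl N) 1 0 (by simp)]
  rw [zero_add]

theorem taowa_spec : Claim_unchanged_taowa := by
  intro arr k n hdom hpre hnd
  show taowa arr k n = taowa_alt arr k n
  by_cases harr : arr = []
  · subst harr
    simp [taowa, taowa_alt]
  · rcases hpre with h | ⟨h1, h2⟩
    · exact absurd h harr
    by_cases hn0 : n ≤ 0
    · rw [A_nopass arr k n harr hn0,
          show taowa_alt arr k n = 0 from by unfold taowa_alt; rw [if_pos (Or.inr hn0)]]
      by_cases hz : n = 0
      · subst hz; exact PySem.List.pyGetD_zero_cons 0 arr 0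
      · have hneg : n < 0 := by omega
        by_cases hin : -(arr.length:Int) ≤ n
        · have h0 : PySem.List.pyGetD arr n 0 = 0 := by
            by_contra hne
            exact hnd ⟨harr, hin, hneg, hne⟩
          rw [pyGetD_cons_neg 0 arr n hin hneg, h0]
        · rw [show n = -(((arr.length + 1 : Nat)):Int) from by push_cast; omega,
              PySem.List.pyGetD_neg_natCast _ _ _ (by omega) (by simp)]
          simp
    · by_cases hk : k ≤ 0
      · rw [A_nok arr k n harr hk, getD_shift arr n (by omega)]
        unfold taowa_alt
        rw [if_neg (show ¬ (arr = [] ∨ n ≤ 0) by push Not; exact ⟨harr, by omega⟩), if_pos hk]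
      · exact main_pos arr k n harr (by omega) h2 (by omega)

theorem taowa_changed : Claim_changed_taowa := by unfold Claim_changed_taowa; decide

theorem taowa_tight : Claim_exact_taowa := by
  intro arr k n hdom hpre hd
  obtain ⟨harr, hin, hneg, hne⟩ := hd
  rw [A_nopass arr k n harr (by omega), pyGetD_cons_neg 0 arr n hin hneg,
      show taowa_alt arr k n = 0 from by unfold taowa_alt; rw [if_pos (Or.inr (by omega))]]
  exact hne
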